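-- pv_equiv track=rewrite | github.com/duandy18/wms-api | app/wms/inventory_adjustment/return_inbound/routers/order_refs.py | _clean_item_ids
-- ===== SOURCE A (Python) =====
-- from collections.abc import Iterable
--
-- def _clean_item_ids(values: Iterable[int] | None) -> list[int]:
--     if values is None:
--         return []
--
--     out: set[int] = set()
--     for value in values:
--         if value is None:
--             continue
--         item_id = int(value)
--         if item_id > 0:
--             out.add(item_id)
--     return sorted(out)
-- ===== SOURCE B (Python) =====
-- from collections.abc import Iterable
--
--
-- def _clean_item_ids(values: Iterable[int] | None) -> list[int]:
--     if values is None: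
--         return []
--
--     ids = sorted(int(value) for value in values
--                  if value is not None and int(value) > 0)
--     out: list[int] = []
--     for item_id in ids:
--         if not out or out[-1] != item_id:
--             out.append(item_id)
--     return out
-- ===== Notes on version B (the rewrite author's own statement) =====
-- stated objective: alternative
-- what changed: B never builds a set: it filters the positive ids with a comprehension, sorts that plain list (duplicates included), and removes duplicates in one adjacent-comparison pass over the sorted list.
import Mathlib
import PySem

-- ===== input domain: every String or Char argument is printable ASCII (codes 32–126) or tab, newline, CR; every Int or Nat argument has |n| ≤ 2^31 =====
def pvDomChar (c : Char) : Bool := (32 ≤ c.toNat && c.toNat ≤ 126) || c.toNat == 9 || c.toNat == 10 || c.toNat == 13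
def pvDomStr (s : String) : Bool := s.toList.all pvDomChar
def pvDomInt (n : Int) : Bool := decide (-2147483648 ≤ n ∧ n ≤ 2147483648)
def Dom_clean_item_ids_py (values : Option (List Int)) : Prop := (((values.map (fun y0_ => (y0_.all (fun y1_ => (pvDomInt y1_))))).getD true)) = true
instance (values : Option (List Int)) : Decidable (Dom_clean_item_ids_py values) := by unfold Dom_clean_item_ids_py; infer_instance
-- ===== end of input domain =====

-- B builds no set: it filters the positives with a comprehension, sorts them duplicates and all, then drops duplicates in one adjacent-comparison pass (alternative algorithm, same cost).
-- ===== PORT A =====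
def clean_item_ids_py (values : Option (List Int)) : List Int :=
  match values with
  | none => []
  | some vs =>
    -- out = set(); for value in values: (value is None never holds for ints); if int(value) > 0: out.add(value)
    let out : PySem.Set Int :=
      vs.foldl (fun out value => if value > 0 then PySem.Set.add out value else out) PySem.Set.empty
    PySem.List.sorted out (fun x => x) false

-- ===== PORT B =====
def clean_item_ids_py_alt (values : Option (List Int)) : List Int :=
  match values with
  | none => []
  | some vs =>
    -- ids = sorted(int(value) for value in values if value is not None and int(value) > 0)
    let ids := PySem.List.sorted (vs.filter (fun value => decide (value > 0))) (fun x => x) false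
    -- for item_id in ids: if not out or out[-1] != item_id: out.append(item_id)
    ids.foldl
      (fun out item_id =>
        if out = [] ∨ out.getLast? ≠ some item_id then out ++ [item_id] else out) []

-- ===== PRECONDITION & SPEC =====
def Spec_clean_item_ids_py (values : Option (List Int)) (out : List Int) : Prop := out = clean_item_ids_py_alt values
instance (values : Option (List Int)) (out : List Int) : Decidable (Spec_clean_item_ids_py values out) := by unfold Spec_clean_item_ids_py; infer_instance

-- ===== CLAIM (what is proved, stated in full; the proofs are below) =====
def Claim_equal_clean_item_ids_py : Prop := ∀ (values : Option (List Int)), Dom_clean_item_ids_py values → Spec_clean_item_ids_py values (clean_item_ids_py values)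

-- ===== LEMMAS AND PROOFS =====

-- A's loop builds set(filter(positive, vs))
lemma foldl_set_if (vs : List Int) (acc : PySem.Set Int) :
    vs.foldl (fun out value => if value > 0 then PySem.Set.add out value else out) acc
      = (vs.filter (fun v => decide (v > 0))).foldl PySem.Set.add acc := by
  induction vs generalizing acc with
  | nil => rfl
  | cons x t ih =>
    simp only [List.foldl_cons, List.filter_cons]
    by_cases h : x > 0 <;> simp [h, ih]

-- B's appending condition is just "last element is not item_id"
lemma dd_cond (out : List Int) (x : Int) :
    (out = [] ∨ out.getLast? ≠ some x) ↔ out.getLast? ≠ some x := by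
  constructor
  · rintro (rfl | h) <;> simp_all
  · exact Or.inr

-- the adjacent-dedup fold on a ≤-sorted list: strictly increasing, same members
lemma dd_main (s : List Int) (acc : List Int)
    (hs : s.Pairwise (· ≤ ·)) (hacc : acc.Pairwise (· < ·))
    (hb : ∀ l, acc.getLast? = some l → (∀ a ∈ acc, a ≤ l) ∧ ∀ x ∈ s, l ≤ x) :
    (s.foldl (fun out x => if out = [] ∨ out.getLast? ≠ some x then out ++ [x] else out) acc).Pairwise (· < ·)
    ∧ ∀ y, (y ∈ s.foldl (fun out x => if out = [] ∨ out.getLast? ≠ some x then out ++ [x] else out) acc ↔ y ∈ acc ∨ y ∈ s) := by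
  induction s generalizing acc with
  | nil => simpa using hacc
  | cons x t ih =>
    simp only [List.foldl_cons]
    by_cases h : acc.getLast? = some x
    · rw [if_neg (fun hc => (dd_cond acc x).mp hc h)]
      have hx : x ∈ acc := List.mem_of_getLast? h
      have := ih acc (hs.tail) hacc (by
        intro l hl
        have h1 := hb l hl
        exact ⟨h1.1, fun y hy => h1.2 y (List.mem_cons_of_mem _ hy)⟩)
      refine ⟨this.1, fun y => ?_⟩
      rw [(this.2 y)]
      constructor
      · rintro (hy | hy)
        · exact Or.inl hy
        · exact Or.inr (List.mem_cons_of_mem _ hy)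
      · rintro (hy | hy)
        · exact Or.inl hy
        · rcases List.mem_cons.mp hy with rfl | hy
          · exact Or.inl hx
          · exact Or.inr hy
    · rw [if_pos ((dd_cond acc x).mpr h)]
      have hlt : ∀ a ∈ acc, a < x := by
        intro a ha
        rcases hl : acc.getLast? with _ | l
        · simp [List.getLast?_eq_none_iff] at hl; simp [hl] at ha
        · have h1 := hb l hl
          have hax : a ≤ l := h1.1 a ha
          have hlx : l ≤ x := h1.2 x (List.mem_cons_self)
          have : l ≠ x := fun e => h (by rw [hl, e])
          omega
      have hacc' : (acc ++ [x]).Pairwise (· < ·) := by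
        rw [List.pairwise_append]
        exact ⟨hacc, List.pairwise_singleton _ _, by simpa using hlt⟩
      have := ih (acc ++ [x]) hs.tail hacc' (by
        intro l hl
        have hxl : x = l := by simpa using hl
        subst hxl
        refine ⟨?_, ?_⟩
        · intro a ha
          rcases List.mem_append.mp ha with ha | ha
          · exact le_of_lt (hlt a ha)
          · simp at ha; omega
        · intro y hy
          exact (List.pairwise_cons.mp hs).1 y hy)
      refine ⟨this.1, fun y => ?_⟩
      rw [this.2 y]
      constructor
      · rintro (hy | hy)
        · rcases List.mem_append.mp hy with hy | hy
          · exact Or.inl hy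
          · simp at hy; exact Or.inr (by simp [hy])
        · exact Or.inr (List.mem_cons_of_mem _ hy)
      · rintro (hy | hy)
        · exact Or.inl (List.mem_append_left _ hy)
        · rcases List.mem_cons.mp hy with rfl | hy
          · exact Or.inl (by simp)
          · exact Or.inr hy

theorem main_eq (vs : List Int) : clean_item_ids_py (some vs) = clean_item_ids_py_alt (some vs) := by
  unfold clean_item_ids_py clean_item_ids_py_alt
  simp only [foldl_set_if]
  set f := vs.filter (fun v => decide (v > 0)) with hf
  have hofl : f.foldl PySem.Set.add PySem.Set.empty = PySem.Set.ofList f := by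
    rw [PySem.Set.ofList_eq_foldl]; rfl
  rw [hofl]
  set s := PySem.List.sorted f (fun x => x) false with hsdef
  have hs : s.Pairwise (· ≤ ·) := by
    have := PySem.List.sorted_pairwise f (fun x => x)
    simpa using this
  have hdd := dd_main s [] hs (List.Pairwise.nil) (by intro l hl; simp at hl)
  set B := s.foldl (fun out x => if out = [] ∨ out.getLast? ≠ some x then out ++ [x] else out) [] with hB
  have hmemB : ∀ y, y ∈ B ↔ y ∈ f := by
    intro y
    rw [hdd.2 y]
    simp [hsdef, PySem.List.mem_sorted]
  have hnodupB : B.Nodup := hdd.1.imp ne_of_lt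
  have hperm : B.Perm (PySem.Set.ofList f) := by
    rw [List.perm_ext_iff_of_nodup hnodupB (PySem.Set.nodup_ofList f)]
    intro y
    rw [hmemB y, PySem.Set.mem_ofList]
  exact PySem.List.sorted_eq_of_perm_of_pairwise_lt (PySem.Set.ofList f) B (fun x => x) hperm (by simpa using hdd.1)

-- ===== VERDICT (by name: the statement is the Claim_ definition above) =====
theorem clean_item_ids_py_spec : Claim_equal_clean_item_ids_py := by
  intro values _
  unfold Spec_clean_item_ids_py
  cases values with
  | none => rfl
  | some vs => exact main_eq vs
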